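-- pv_equiv track=rewrite | github.com/KahunaCodes/ai-commit | ai_commit.py | generate_simple_commit_message
-- ===== SOURCE A (Python) =====
-- COMMIT_MESSAGE_RULES = [
--     {
--         "conditions": {
--             "files_contain": ["cli/database_viewer.py"],
--             "file_status": "A"
--         },
--         "message": "Complete CLI modularization with database viewer and claim functions"
--     },
--     {
--         "conditions": {
--             "diff_contains": ["modularization"]
--         },
--         "message": "Complete modularization and fix import issues"
--     },
--     {
--         "conditions": {
--             "files_pattern": "cli/"
--         },
--         "message": "Complete modularization and fix import issues"
--     }
-- ]
--
-- def check_rule_conditions(rule, files_info, diff):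
--     """Check if a rule's conditions are met."""
--     conditions = rule["conditions"]
--
--     # Check files_contain condition
--     if "files_contain" in conditions:
--         for file_path in conditions["files_contain"]:
--             if file_path not in files_info:
--                 return False
--
--     # Check file_status condition
--     if "file_status" in conditions:
--         required_status = conditions["file_status"]
--         if required_status not in files_info:
--             return False
--
--     # Check diff_contains condition
--     if "diff_contains" in conditions:
--         for keyword in conditions["diff_contains"]:
--             if keyword.lower() not in diff.lower():
--                 return False
--
--     # Check files_pattern condition
--     if "files_pattern" in conditions:
--         pattern = conditions["files_pattern"]
--         if pattern not in files_info:
--             return False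
--
--     return True
--
-- def generate_simple_commit_message(files_info, diff):
--     """Generate a simple commit message based on file changes."""
--     lines = files_info.split('\n')
--     if not lines or not lines[0]:
--         return "Update files"
--
--     # Check for contextual rules first
--     for rule in COMMIT_MESSAGE_RULES:
--         if check_rule_conditions(rule, files_info, diff):
--             return rule["message"]
--
--     # Count different types of changes
--     added = sum(1 for line in lines if line.startswith('A'))
--     modified = sum(1 for line in lines if line.startswith('M'))
--     deleted = sum(1 for line in lines if line.startswith('D'))
--
--     # Generate message based on changes
--     parts = []
--     if added > 0:
--         parts.append(f"Add {added} file{'s' if added > 1 else ''}")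
--     if modified > 0:
--         parts.append(f"Update {modified} file{'s' if modified > 1 else ''}")
--     if deleted > 0:
--         parts.append(f"Delete {deleted} file{'s' if deleted > 1 else ''}")
--
--     if len(parts) == 0:
--         return "Update files"
--
--     return " and ".join(parts)
-- ===== SOURCE B (Python) =====
-- def generate_simple_commit_message(files_info, diff):
--     """Generate a simple commit message based on file changes."""
--     first = files_info[:1]
--     if first == '' or first == '\n':
--         return "Update files"
--
--     # Contextual rules, inlined in order
--     if "cli/database_viewer.py" in files_info and "A" in files_info:
--         return "Complete CLI modularization with database viewer and claim functions"
--     if "modularization" in diff.lower() or "cli/" in files_info: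
--         return "Complete modularization and fix import issues"
--
--     # One pass over the lines: tally by first character
--     counts = {}
--     for line in files_info.split('\n'):
--         key = line[:1]
--         counts[key] = counts.get(key, 0) + 1
--
--     pairs = [(verb, counts.get(status, 0)) for verb, status in
--              (("Add", "A"), ("Update", "M"), ("Delete", "D"))]
--     parts = [f"{verb} {n} file{'s' if n > 1 else ''}" for verb, n in pairs if n > 0]
--     return " and ".join(parts) if parts else "Update files"
-- ===== Notes on version B (the rewrite author's own statement) =====
-- stated objective: alternative
-- what changed: The generic rule-table walk (check_rule_conditions over COMMIT_MESSAGE_RULES) is inlined into a direct decision chain, and the three separate startswith-counting passes over the lines are replaced by a single pass building a counter dict keyed on each line's first character, from which added/modified/deleted are read.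
import Mathlib
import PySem

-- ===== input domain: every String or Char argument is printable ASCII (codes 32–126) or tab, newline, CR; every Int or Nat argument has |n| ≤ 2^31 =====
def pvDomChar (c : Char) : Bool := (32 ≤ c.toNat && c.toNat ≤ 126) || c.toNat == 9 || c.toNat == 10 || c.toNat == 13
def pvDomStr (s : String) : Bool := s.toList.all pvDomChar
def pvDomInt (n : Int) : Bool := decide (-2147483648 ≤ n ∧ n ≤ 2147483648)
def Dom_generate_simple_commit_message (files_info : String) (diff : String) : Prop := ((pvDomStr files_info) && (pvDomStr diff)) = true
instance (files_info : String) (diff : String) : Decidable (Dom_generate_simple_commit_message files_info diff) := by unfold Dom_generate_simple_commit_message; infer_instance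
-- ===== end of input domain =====

-- B replaces the generic rule-table walk by an inlined decision chain and the three
-- separate startswith-counting passes by ONE counter-dict pass keyed on line[:1] (objective: alternative decomposition).

-- shared primitive: files_info.split('\n')  (both Pythons call it)
def pvSplitNL (s : String) : List String :=
  (PySem.Chars.splitOn s.toList ['\n']).map String.ofList

-- ===== PORT A =====
structure pvRule where
  files_contain : Option (List String)
  file_status : Option String
  diff_contains : Option (List String)
  files_pattern : Option String
  message : String
deriving Repr, DecidableEq

def pvRules : List pvRule := [
  { files_contain := some ["cli/database_viewer.py"], file_status := some "A",
    diff_contains := none, files_pattern := none,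
    message := "Complete CLI modularization with database viewer and claim functions" },
  { files_contain := none, file_status := none,
    diff_contains := some ["modularization"], files_pattern := none,
    message := "Complete modularization and fix import issues" },
  { files_contain := none, file_status := none,
    diff_contains := none, files_pattern := some "cli/",
    message := "Complete modularization and fix import issues" }]

-- check_rule_conditions, condition groups in source order (&& short-circuits like the early returns)
def pvRuleCheck (r : pvRule) (files_info : String) (diff : String) : Bool :=
  (match r.files_contain with
   | none => true
   | some fps => fps.all (fun fp => PySem.Str.isIn fp files_info)) &&
  (match r.file_status with
   | none => true
   | some st => PySem.Str.isIn st files_info) &&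
  (match r.diff_contains with
   | none => true
   | some kws => kws.all (fun kw => PySem.Str.isIn (PySem.Str.lower kw) (PySem.Str.lower diff))) &&
  (match r.files_pattern with
   | none => true
   | some pat => PySem.Str.isIn pat files_info)

-- the counting tail of A: added/modified/deleted, parts, join
def pvCountTailA (lines : List String) : String :=
  let added := (lines.map (fun l => if PySem.Str.startswith l "A" then (1:Int) else 0)).sum
  let modified := (lines.map (fun l => if PySem.Str.startswith l "M" then (1:Int) else 0)).sum
  let deleted := (lines.map (fun l => if PySem.Str.startswith l "D" then (1:Int) else 0)).sum
  let parts : List String :=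
    (if added > 0 then ["Add " ++ PySem.Int.toStr added ++ " file" ++ (if added > 1 then "s" else "")] else []) ++
    (if modified > 0 then ["Update " ++ PySem.Int.toStr modified ++ " file" ++ (if modified > 1 then "s" else "")] else []) ++
    (if deleted > 0 then ["Delete " ++ PySem.Int.toStr deleted ++ " file" ++ (if deleted > 1 then "s" else "")] else [])
  if parts.length = 0 then "Update files" else PySem.Str.join " and " parts

def generate_simple_commit_message (files_info : String) (diff : String) : String :=
  let lines := pvSplitNL files_info
  if lines.isEmpty || lines.headD "" == "" then "Update files"
  else
    match pvRules.find? (fun r => pvRuleCheck r files_info diff) with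
    | some r => r.message
    | none => pvCountTailA lines

-- ===== PORT B =====
def pvFmt (verb : String) (n : Int) : String :=
  verb ++ " " ++ PySem.Int.toStr n ++ " file" ++ (if n > 1 then "s" else "")

-- the counting tail of B: one pass building a counter dict keyed on line[:1]
def pvCountTailB (lines : List String) : String :=
  let counts := lines.foldl
    (fun d line => d.insert (PySem.Str.slice line none (some 1))
                            (d.getD (PySem.Str.slice line none (some 1)) 0 + 1))
    (PySem.Dict.empty : PySem.Dict String Int)
  let pairs := [("Add", "A"), ("Update", "M"), ("Delete", "D")].map
    (fun p => (p.1, counts.getD p.2 0))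
  let parts := (pairs.filter (fun p => p.2 > 0)).map (fun p => pvFmt p.1 p.2)
  if parts.isEmpty then "Update files" else PySem.Str.join " and " parts

def generate_simple_commit_message_alt (files_info : String) (diff : String) : String :=
  let first := PySem.Str.slice files_info none (some 1)
  if first == "" || first == "\n" then "Update files"
  else if PySem.Str.isIn "cli/database_viewer.py" files_info && PySem.Str.isIn "A" files_info then
    "Complete CLI modularization with database viewer and claim functions"
  else if PySem.Str.isIn "modularization" (PySem.Str.lower diff) || PySem.Str.isIn "cli/" files_info then
    "Complete modularization and fix import issues"
  else pvCountTailB (pvSplitNL files_info)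

-- ===== PRECONDITION & SPEC =====
def Spec_generate_simple_commit_message (files_info : String) (diff : String) (out : String) : Prop := out = generate_simple_commit_message_alt files_info diff
instance (files_info : String) (diff : String) (out : String) : Decidable (Spec_generate_simple_commit_message files_info diff out) := by unfold Spec_generate_simple_commit_message; infer_instance

-- ===== CLAIM (what is proved, stated in full; the proofs are below) =====
def Claim_equal_generate_simple_commit_message : Prop := ∀ (files_info : String) (diff : String), Dom_generate_simple_commit_message files_info diff → Spec_generate_simple_commit_message files_info diff (generate_simple_commit_message files_info diff)

-- ===== LEMMAS AND PROOFS =====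

lemma pv_strBeq_eq (x y : String) : (x == y) = (x.toList == y.toList) := by
  rw [Bool.eq_iff_iff]
  simp only [beq_iff_eq]
  exact ⟨fun h => by rw [h], fun h => String.ext h⟩

lemma pv_go_acc (sep : List Char) : ∀ (fuel : Nat) (l cur : List Char) (acc : List (List Char)),
    PySem.Chars.splitOn.go sep fuel l cur acc = acc.reverse ++ PySem.Chars.splitOn.go sep fuel l cur [] := by
  intro fuel
  induction fuel with
  | zero => intro l cur acc; rw [PySem.Chars.splitOn.go.eq_def, PySem.Chars.splitOn.go.eq_def]; simp
  | succ n ih =>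
    intro l cur acc
    cases l with
    | nil => rw [PySem.Chars.splitOn.go.eq_def, PySem.Chars.splitOn.go.eq_def]; simp
    | cons c rest =>
      rw [PySem.Chars.splitOn.go.eq_def]
      conv_rhs => rw [PySem.Chars.splitOn.go.eq_def]
      simp only
      by_cases hp : sep.isPrefixOf (c :: rest) = true
      · simp only [hp, if_true]
        rw [ih _ _ (cur.reverse :: acc), ih _ _ [cur.reverse]]
        simp
      · simp only [hp]
        exact ih _ _ acc

lemma pv_go_head (sep : List Char) : ∀ (fuel : Nat) (l cur : List Char),
    ∃ t rest', PySem.Chars.splitOn.go sep fuel l cur [] = (cur.reverse ++ t) :: rest' := by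
  intro fuel
  induction fuel with
  | zero => intro l cur; exact ⟨l, [], by rw [PySem.Chars.splitOn.go.eq_def]; simp⟩
  | succ n ih =>
    intro l cur
    cases l with
    | nil =>
      exact ⟨[], [], by rw [PySem.Chars.splitOn.go.eq_def]; simp⟩
    | cons c rest =>
      rw [PySem.Chars.splitOn.go.eq_def]
      simp only
      by_cases hp : sep.isPrefixOf (c :: rest) = true
      · simp only [hp, if_true]
        rw [pv_go_acc]
        exact ⟨[], PySem.Chars.splitOn.go sep n (List.drop sep.length (c :: rest)) [] [], by simp⟩
      · simp only [hp]
        obtain ⟨t, rest', h⟩ := ih rest (c :: cur)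
        exact ⟨c :: t, rest', by rw [h]; simp⟩

lemma pv_splitOn_newline (rest : List Char) :
    ∃ t, PySem.Chars.splitOn ('\n' :: rest) ['\n'] = [] :: t := by
  unfold PySem.Chars.splitOn
  rw [PySem.Chars.splitOn.go.eq_def]
  have hp : List.isPrefixOf ['\n'] ('\n' :: rest) = true := by simp [List.isPrefixOf]
  simp only [List.length_cons, hp, if_true]
  rw [pv_go_acc]
  refine ⟨PySem.Chars.splitOn.go ['\n'] (rest.length + 1) (List.drop (([] : List ℤ).length + 1) ('\n' :: rest)) [] [], ?_⟩
  simp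

lemma pv_splitOn_cons_ne (c : Char) (rest : List Char) (h : ¬ c = '\n') :
    ∃ t rest', PySem.Chars.splitOn (c :: rest) ['\n'] = (c :: t) :: rest' := by
  unfold PySem.Chars.splitOn
  rw [PySem.Chars.splitOn.go.eq_def]
  have hp : List.isPrefixOf ['\n'] (c :: rest) = false := by
    simp only [List.isPrefixOf, Bool.and_true, beq_eq_false_iff_ne, ne_eq]
    exact fun he => h he.symm
  simp only [List.length_cons, hp, Bool.false_eq_true, if_false]
  obtain ⟨t, rest', hgo⟩ := pv_go_head ['\n'] (rest.length + 1) rest [c]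
  exact ⟨t, rest', by rw [hgo]; simp⟩

lemma pv_slice1 (l : String) : (PySem.Str.slice l none (some 1)).toList = l.toList.take 1 := by
  rw [PySem.Str.toList_slice, PySem.Chars.slice_eq_listSlice]
  simp only [PySem.List.slice, PySem.List.clampIdx]
  norm_num

lemma pv_sliceBeq (fi s : String) :
    (PySem.Str.slice fi none (some 1) == s) = (fi.toList.take 1 == s.toList) := by
  rw [pv_strBeq_eq, pv_slice1]

lemma pv_guard (fi : String) :
    ((pvSplitNL fi).isEmpty || ((pvSplitNL fi).headD "" == "")) =
    ((PySem.Str.slice fi none (some 1) == "") || (PySem.Str.slice fi none (some 1) == "\n")) := by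
  rw [pv_sliceBeq, pv_sliceBeq]
  rcases hl : fi.toList with _ | ⟨c, rest⟩
  · have h0 : fi = "" := String.ext hl
    subst h0
    decide
  · unfold pvSplitNL
    rw [hl]
    by_cases hc : c = '\n'
    · subst hc
      obtain ⟨t, hsp⟩ := pv_splitOn_newline rest
      rw [hsp]
      simp
    · obtain ⟨t, r', hsp⟩ := pv_splitOn_cons_ne c rest hc
      rw [hsp]
      simp [pv_strBeq_eq, hc]

lemma pv_counter_getD (key : String → String) (s : String) : ∀ (lines : List String) (d : PySem.Dict String Int),
    (lines.foldl (fun d line => d.insert (key line) (d.getD (key line) 0 + 1)) d).getD s 0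
    = d.getD s 0 + (lines.countP (fun l => key l == s) : Int) := by
  intro lines
  induction lines with
  | nil => intro d; simp
  | cons x xs ih =>
    intro d
    simp only [List.foldl_cons, List.countP_cons]
    rw [ih, PySem.Dict.getD_insert]
    by_cases hs : s = key x
    · simp only [hs, beq_self_eq_true, if_true]
      push_cast
      omega
    · have hb : (key x == s) = false := by
        simp only [beq_eq_false_iff_ne, ne_eq]
        exact fun he => hs he.symm
      simp [hs, hb]

lemma pv_key_startswith (l s : String) (a : Char) (hs : s.toList = [a]) :
    ((PySem.Str.slice l none (some 1)) == s) = PySem.Str.startswith l s := by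
  rw [pv_sliceBeq, hs]
  rw [show PySem.Str.startswith l s = List.isPrefixOf s.toList l.toList from rfl]
  rw [hs]
  rcases hl : l.toList with _ | ⟨c, rest⟩
  · simp [List.isPrefixOf]
  · simp only [List.take_succ_cons, List.take_zero, List.isPrefixOf]
    rw [Bool.and_true, Bool.eq_iff_iff, beq_iff_eq, beq_iff_eq, List.singleton_inj]
    exact eq_comm

lemma pv_count_eq (lines : List String) (s : String) (a : Char) (hs : s.toList = [a]) :
    (lines.map (fun l => if PySem.Str.startswith l s then (1:Int) else 0)).sum
    = (lines.foldl (fun d line => d.insert (PySem.Str.slice line none (some 1))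
        (d.getD (PySem.Str.slice line none (some 1)) 0 + 1))
        (PySem.Dict.empty : PySem.Dict String Int)).getD s 0 := by
  rw [PySem.List.sum_map_ite_one_zero, pv_counter_getD (fun line => PySem.Str.slice line none (some 1)) s]
  simp only [PySem.Dict.getD_empty, zero_add]
  congr 1
  exact (List.countP_congr (fun x _ => by rw [pv_key_startswith x s a hs])).symm

lemma pv_parts (a m d : Int) :
    (let parts : List String :=
      (if a > 0 then ["Add " ++ PySem.Int.toStr a ++ " file" ++ (if a > 1 then "s" else "")] else []) ++
      (if m > 0 then ["Update " ++ PySem.Int.toStr m ++ " file" ++ (if m > 1 then "s" else "")] else []) ++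
      (if d > 0 then ["Delete " ++ PySem.Int.toStr d ++ " file" ++ (if d > 1 then "s" else "")] else [])
     if parts.length = 0 then "Update files" else PySem.Str.join " and " parts)
    = (let parts := (([("Add", a), ("Update", m), ("Delete", d)].filter (fun p => p.2 > 0)).map
        (fun p => pvFmt p.1 p.2))
       if parts.isEmpty then "Update files" else PySem.Str.join " and " parts) := by
  have hA : ∀ x : Int, pvFmt "Add" x = "Add " ++ PySem.Int.toStr x ++ " file" ++ (if x > 1 then "s" else "") := by
    intro x; unfold pvFmt
    rw [show ("Add" ++ " " : String) = "Add " from by decide]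
  have hM : ∀ x : Int, pvFmt "Update" x = "Update " ++ PySem.Int.toStr x ++ " file" ++ (if x > 1 then "s" else "") := by
    intro x; unfold pvFmt
    rw [show ("Update" ++ " " : String) = "Update " from by decide]
  have hD : ∀ x : Int, pvFmt "Delete" x = "Delete " ++ PySem.Int.toStr x ++ " file" ++ (if x > 1 then "s" else "") := by
    intro x; unfold pvFmt
    rw [show ("Delete" ++ " " : String) = "Delete " from by decide]
  by_cases ha : a > 0 <;> by_cases hm : m > 0 <;> by_cases hd : d > 0 <;>
    simp [ha, hm, hd, List.filter, hA, hM, hD]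

lemma pv_tail (lines : List String) : pvCountTailA lines = pvCountTailB lines := by
  unfold pvCountTailA pvCountTailB
  simp only [List.map_cons, List.map_nil]
  rw [pv_count_eq lines "A" 'A' rfl, pv_count_eq lines "M" 'M' rfl, pv_count_eq lines "D" 'D' rfl]
  exact pv_parts _ _ _

-- ===== VERDICT (by name: the statement is the Claim_ definition above) =====
theorem generate_simple_commit_message_spec : Claim_equal_generate_simple_commit_message := by
  intro fi diff _
  unfold Spec_generate_simple_commit_message
  unfold generate_simple_commit_message generate_simple_commit_message_alt
  simp only [pv_guard]
  by_cases hg : ((PySem.Str.slice fi none (some 1) == "") || (PySem.Str.slice fi none (some 1) == "\n")) = true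
  · simp [hg]
  · have hmod : PySem.Str.lower "modularization" = "modularization" := by decide
    cases h1 : PySem.Str.isIn "cli/database_viewer.py" fi <;>
    cases h2 : PySem.Str.isIn "A" fi <;>
    cases h3 : PySem.Str.isIn "modularization" (PySem.Str.lower diff) <;>
    cases h4 : PySem.Str.isIn "cli/" fi <;>
      simp only [hg, Bool.false_eq_true, if_false, if_true, pvRules, pvRuleCheck, List.find?,
        List.all_cons, List.all_nil, Bool.and_true, Bool.and_false,
        Bool.or_true, Bool.or_false, hmod, h1, h2, h3, h4, pv_tail]
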